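-- pv_equiv track=rewrite | github.com/plurigrid/asi | ies/music-topos/scripts/discohy_operad_4_thread.py | compute_relation
-- ===== SOURCE A (Python) =====
-- from typing import Any, Iterator
--
-- def compute_relation(
--
--     operad1: dict[str, Any],
--     operad2: dict[str, Any]
-- ) -> set[tuple[str, str]]:
--     """Compute bisimulation relation as set of related node pairs."""
--
--     relation = set()
--     nodes1 = operad1.get("nodes", {})
--     nodes2 = operad2.get("nodes", {})
--
--     # Pair nodes with matching trits
--     for id1, n1 in nodes1.items():
--         for id2, n2 in nodes2.items():
--             if n1.get("trit") == n2.get("trit") and n1.get("arity") == n2.get("arity"):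
--                 relation.add((id1, id2))
--
--     return relation
-- ===== SOURCE B (Python) =====
-- def compute_relation(operad1, operad2):
--     """Compute bisimulation relation as set of related node pairs.
--
--     Alternative strategy: bucket nodes2 by (trit, arity) key once, then for each node of nodes1
--     emit its whole bucket — no inner scan over nodes2.
--     """
--     nodes1 = operad1.get("nodes", {})
--     nodes2 = operad2.get("nodes", {})
--     keyed2 = [((n2.get("trit"), n2.get("arity")), id2) for id2, n2 in nodes2.items()]
--     index = {}
--     for key, id2 in keyed2:
--         index.setdefault(key, []).append(id2)
--     relation = set()
--     for id1, n1 in nodes1.items():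
--         for id2 in index.get((n1.get("trit"), n1.get("arity")), []):
--             relation.add((id1, id2))
--     return relation
-- ===== Notes on version B (the rewrite author's own statement) =====
-- stated objective: alternative
-- what changed: Replaced the nested scan of nodes2 for every node of nodes1 by a one-pass dict bucketing nodes2 ids by their (trit, arity) key, then one pass over nodes1 emitting each node's bucket.
import Mathlib
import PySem

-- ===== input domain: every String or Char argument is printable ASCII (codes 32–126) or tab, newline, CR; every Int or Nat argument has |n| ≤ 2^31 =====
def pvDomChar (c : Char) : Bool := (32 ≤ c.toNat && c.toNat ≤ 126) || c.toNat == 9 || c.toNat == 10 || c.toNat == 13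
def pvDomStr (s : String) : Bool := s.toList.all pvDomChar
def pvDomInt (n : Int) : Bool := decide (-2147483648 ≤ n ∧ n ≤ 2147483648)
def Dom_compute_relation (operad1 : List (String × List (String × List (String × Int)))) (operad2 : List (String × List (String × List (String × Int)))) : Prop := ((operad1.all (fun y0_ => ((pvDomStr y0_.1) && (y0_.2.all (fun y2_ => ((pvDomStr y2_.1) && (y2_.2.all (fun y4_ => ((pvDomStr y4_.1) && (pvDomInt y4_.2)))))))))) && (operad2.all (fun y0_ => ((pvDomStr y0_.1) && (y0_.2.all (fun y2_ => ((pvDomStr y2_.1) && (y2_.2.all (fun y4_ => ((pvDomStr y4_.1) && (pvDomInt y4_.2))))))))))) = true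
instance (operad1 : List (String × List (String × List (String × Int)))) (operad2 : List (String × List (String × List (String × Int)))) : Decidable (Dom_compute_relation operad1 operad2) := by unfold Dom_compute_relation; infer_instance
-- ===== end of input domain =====

-- ===== PORT A =====
-- B restructures A: it buckets nodes2 by (trit, arity) once instead of scanning nodes2 for every node of nodes1.
-- key of a node: (n.get("trit"), n.get("arity"))
def pvKey (n : List (String × Int)) : Option Int × Option Int :=
  ((PySem.Dict.mk n).get? "trit", (PySem.Dict.mk n).get? "arity")

def compute_relation (operad1 : List (String × List (String × List (String × Int)))) (operad2 : List (String × List (String × List (String × Int)))) : List (String × String) :=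
  let nodes1 := (PySem.Dict.mk operad1).getD "nodes" []
  let nodes2 := (PySem.Dict.mk operad2).getD "nodes" []
  nodes1.foldl (fun rel p1 =>
    nodes2.foldl (fun rel p2 =>
      if ((PySem.Dict.mk p1.2).get? "trit" == (PySem.Dict.mk p2.2).get? "trit"
          && (PySem.Dict.mk p1.2).get? "arity" == (PySem.Dict.mk p2.2).get? "arity")
      then PySem.Set.add rel (p1.1, p2.1) else rel) rel) PySem.Set.empty

-- ===== PORT B =====
def compute_relation_alt (operad1 : List (String × List (String × List (String × Int)))) (operad2 : List (String × List (String × List (String × Int)))) : List (String × String) :=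
  let nodes1 := (PySem.Dict.mk operad1).getD "nodes" []
  let nodes2 := (PySem.Dict.mk operad2).getD "nodes" []
  let keyed2 := nodes2.map (fun p2 => (pvKey p2.2, p2.1))
  -- index.setdefault(key, []).append(id2)  ==  index[key] = index.get(key, []) + [id2]
  let index := keyed2.foldl (fun d p => d.modify p.1 [] (fun l => l ++ [p.2])) PySem.Dict.empty
  nodes1.foldl (fun rel p1 =>
    (index.getD (pvKey p1.2) []).foldl (fun rel id2 => PySem.Set.add rel (p1.1, id2)) rel)
    PySem.Set.empty

-- ===== PRECONDITION & SPEC =====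
def Spec_compute_relation (operad1 : List (String × List (String × List (String × Int)))) (operad2 : List (String × List (String × List (String × Int)))) (out : List (String × String)) : Prop := out = compute_relation_alt operad1 operad2
instance (operad1 : List (String × List (String × List (String × Int)))) (operad2 : List (String × List (String × List (String × Int)))) (out : List (String × String)) : Decidable (Spec_compute_relation operad1 operad2 out) := by unfold Spec_compute_relation; infer_instance

-- ===== CLAIM (what is proved, stated in full; the proofs are below) =====
def Claim_equal_compute_relation : Prop := ∀ (operad1 : List (String × List (String × List (String × Int)))) (operad2 : List (String × List (String × List (String × Int)))), Dom_compute_relation operad1 operad2 → Spec_compute_relation operad1 operad2 (compute_relation operad1 operad2)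

-- ===== LEMMAS AND PROOFS =====

-- A's inner scan over nodes2 adds exactly the ids of the nodes whose key matches, in order.
theorem pv_inner_filter (l : List (String × List (String × Int))) (k : Option Int × Option Int)
    (id1 : String) (rel : PySem.Set (String × String)) :
    l.foldl (fun rel p2 => if pvKey p2.2 == k then PySem.Set.add rel (id1, p2.1) else rel) rel
      = ((l.filter (fun p => pvKey p.2 == k)).map (·.1)).foldl
          (fun rel id2 => PySem.Set.add rel (id1, id2)) rel := by
  induction l generalizing rel with
  | nil => rfl
  | cons q t ih =>
    by_cases h : (pvKey q.2 == k) = true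
    · rw [List.foldl_cons, if_pos h, List.filter_cons, if_pos h, List.map_cons,
        List.foldl_cons, ih]
    · rw [List.foldl_cons, if_neg h, List.filter_cons, if_neg h, ih]

-- == on Option Int is symmetric (it decides equality).
theorem pv_beq_comm (a b : Option Int) : (a == b) = (b == a) := by
  rw [Bool.eq_iff_iff, beq_iff_eq, beq_iff_eq]; exact eq_comm

-- A's match condition is key equality, in the orientation the bucket filter uses.
theorem pv_cond_eq (n1 n2 : List (String × Int)) :
    ((PySem.Dict.mk n1).get? "trit" == (PySem.Dict.mk n2).get? "trit"
      && (PySem.Dict.mk n1).get? "arity" == (PySem.Dict.mk n2).get? "arity")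
      = (pvKey n2 == pvKey n1) := by
  show _ = ((PySem.Dict.mk n2).get? "trit" == (PySem.Dict.mk n1).get? "trit"
      && (PySem.Dict.mk n2).get? "arity" == (PySem.Dict.mk n1).get? "arity")
  rw [pv_beq_comm, pv_beq_comm ((PySem.Dict.mk n1).get? "arity")]

-- the bucket for key k holds exactly the ids of nodes2 whose key is k, in order
theorem pv_bucket (nodes2 : List (String × List (String × Int))) (k : Option Int × Option Int) :
    (((nodes2.map (fun p2 => (pvKey p2.2, p2.1))).foldl
        (fun d p => d.modify p.1 [] (fun l => l ++ [p.2])) PySem.Dict.empty).getD k [])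
      = ((nodes2.filter (fun p => pvKey p.2 == k)).map (·.1)) := by
  rw [PySem.Dict.getD_foldl_modify_append, PySem.Dict.getD_empty, List.filter_map,
    List.map_map]
  simp only [Function.comp_def, List.nil_append]

theorem compute_relation_spec : Claim_equal_compute_relation := by
  intro operad1 operad2 _
  unfold Spec_compute_relation compute_relation compute_relation_alt
  simp only []
  congr 1
  funext rel p1
  rw [pv_bucket, ← pv_inner_filter]
  simp only [pv_cond_eq]
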